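-- pv_equiv track=rewrite | github.com/NGBigField/KagomePeriodicBP | src/tensor_networks/edges.py | edges_dict_from_edges_list
-- ===== SOURCE A (Python) =====
-- from typing import List, Dict, Tuple
--
-- def edges_dict_from_edges_list(edges_list:List[List[str]])->Dict[str, Tuple[int, int]]:
--     vertices = {}
--     for i, i_edges in enumerate(edges_list):
--         for e in i_edges:
--             if e in vertices:
--                 (j1,j2) = vertices[e]
--                 vertices[e] = (i,j1)
--             else:
--                 vertices[e] = (i,i)
--     return vertices
-- ===== SOURCE B (Python) =====
-- # B: two-pass decomposition — build an occurrence-index dict first, then derive each pair from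
-- # the occurrence list (last, second-to-last), instead of A's running-pair update.
-- def _pair(lst):
--     if len(lst) >= 2:
--         return (lst[-1], lst[-2])
--     return (lst[0], lst[0])
--
--
-- def edges_dict_from_edges_list(edges_list):
--     occ = {}
--     for i, i_edges in enumerate(edges_list):
--         for e in i_edges:
--             occ.setdefault(e, []).append(i)
--     return {e: _pair(lst) for e, lst in occ.items()}
-- ===== Notes on version B (the rewrite author's own statement) =====
-- stated objective: simpler
-- what changed: B replaces A's running-pair update inside the scan by a two-pass decomposition: first build an index mapping each edge to its list of occurrence vertices, then derive each pair (last, second-to-last, or (i,i) for a single occurrence) from that list.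
import Mathlib
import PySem

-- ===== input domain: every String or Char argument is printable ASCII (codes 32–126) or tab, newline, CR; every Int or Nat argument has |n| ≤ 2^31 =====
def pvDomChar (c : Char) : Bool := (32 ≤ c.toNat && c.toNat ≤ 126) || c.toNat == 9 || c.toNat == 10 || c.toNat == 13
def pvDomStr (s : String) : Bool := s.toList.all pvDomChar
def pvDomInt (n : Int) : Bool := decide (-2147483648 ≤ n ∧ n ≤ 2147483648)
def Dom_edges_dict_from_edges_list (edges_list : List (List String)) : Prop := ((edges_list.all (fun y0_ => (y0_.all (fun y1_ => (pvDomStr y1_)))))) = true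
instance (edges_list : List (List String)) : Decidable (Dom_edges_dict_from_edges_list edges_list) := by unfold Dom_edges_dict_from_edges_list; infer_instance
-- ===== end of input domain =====

-- B builds an occurrence-index dict first and derives each pair from it (simpler decomposition);
-- the equivalence A = B is proved on all inputs (both are total).

-- ===== PORT A =====
def edges_dict_from_edges_list (edges_list : List (List String)) : List (String × Int × Int) :=
  ((PySem.List.enumerate edges_list 0).foldl
    (fun (vertices : PySem.Dict String (Int × Int)) p =>
      p.2.foldl (fun vertices e =>
        match vertices.get? e with
        | some (j1, _j2) => vertices.insert e (p.1, j1)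
        | none => vertices.insert e (p.1, p.1)) vertices)
    PySem.Dict.empty).items

-- ===== PORT B =====
-- helper of B: ( lst[-1], lst[-2] ) when len(lst) >= 2, else ( lst[0], lst[0] )
def pvPairB (lst : List Int) : Int × Int :=
  if 2 ≤ lst.length then (PySem.List.pyGetD lst (-1) 0, PySem.List.pyGetD lst (-2) 0)
  else (PySem.List.pyGetD lst 0 0, PySem.List.pyGetD lst 0 0)

def edges_dict_from_edges_list_alt (edges_list : List (List String)) : List (String × Int × Int) :=
  let occ : PySem.Dict String (List Int) :=
    (PySem.List.enumerate edges_list 0).foldl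
      (fun occ p => p.2.foldl (fun occ e => occ.modify e [] (· ++ [p.1])) occ)
      PySem.Dict.empty
  occ.items.map (fun p => (p.1, pvPairB p.2))

-- ===== PRECONDITION & SPEC =====
def Spec_edges_dict_from_edges_list (edges_list : List (List String)) (out : List (String × Int × Int)) : Prop := out = edges_dict_from_edges_list_alt edges_list
instance (edges_list : List (List String)) (out : List (String × Int × Int)) : Decidable (Spec_edges_dict_from_edges_list edges_list out) := by unfold Spec_edges_dict_from_edges_list; infer_instance

-- ===== CLAIM (what is proved, stated in full; the proofs are below) =====
def Claim_equal_edges_dict_from_edges_list : Prop := ∀ (edges_list : List (List String)), Dom_edges_dict_from_edges_list edges_list → Spec_edges_dict_from_edges_list edges_list (edges_dict_from_edges_list edges_list)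

-- ===== LEMMAS AND PROOFS =====

-- the value-mapped image of the occurrence dict
def pvGm (o : PySem.Dict String (List Int)) : PySem.Dict String (Int × Int) :=
  PySem.Dict.mk (o.items.map (fun p => (p.1, pvPairB p.2)))

-- invariant of the occurrence dict during B's first pass
def pvInv (o : PySem.Dict String (List Int)) : Prop :=
  o.keys.Nodup ∧ ∀ p ∈ o.items, p.2 ≠ []

lemma pyGetD_singleton_neg (a : Int) : PySem.List.pyGetD [a] (-1) 0 = a := rfl

lemma pyGetD_append_neg_one (l : List Int) (i : Int) (h : l ≠ []) :
    PySem.List.pyGetD (l ++ [i]) (-1) 0 = i := by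
  unfold PySem.List.pyGetD PySem.List.pyGet? PySem.List.pyIdx?
  have hl : 0 < l.length := List.length_pos_iff.mpr h
  rw [if_neg (by omega : ¬ (0:Int) ≤ -1),
      if_pos (by simp only [List.length_append, List.length_cons, List.length_nil]; push_cast; omega :
        -((l ++ [i]).length:Int) ≤ -1)]
  have : (l ++ [i]).length - (-(-1:Int)).toNat = l.length := by simp
  rw [this]
  simp

lemma pyGetD_append_neg_two (l : List Int) (i : Int) (h : l ≠ []) :
    PySem.List.pyGetD (l ++ [i]) (-2) 0 = PySem.List.pyGetD l (-1) 0 := by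
  unfold PySem.List.pyGetD PySem.List.pyGet? PySem.List.pyIdx?
  have hl : 0 < l.length := List.length_pos_iff.mpr h
  rw [if_neg (by omega : ¬ (0:Int) ≤ -2), if_pos (by simp only [List.length_append, List.length_cons, List.length_nil]; omega :
        -((l ++ [i]).length:Int) ≤ -2),
      if_neg (by omega : ¬ (0:Int) ≤ -1), if_pos (by omega : -(l.length:Int) ≤ -1)]
  have h1 : (l ++ [i]).length - (-(-2:Int)).toNat = l.length - 1 := by simp
  have h2 : l.length - (-(-1:Int)).toNat = l.length - 1 := by simp
  rw [h1, h2]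
  simp only [Option.bind_some]
  rw [List.getElem?_append_left (by omega)]

lemma pvPairB_singleton (i : Int) : pvPairB [i] = (i, i) := by
  simp [pvPairB]

lemma pvPairB_append (l : List Int) (i : Int) (h : l ≠ []) :
    pvPairB (l ++ [i]) = (i, (pvPairB l).1) := by
  have hl : 0 < l.length := List.length_pos_iff.mpr h
  have hlen : 2 ≤ (l ++ [i]).length := by simp; omega
  have hfst : (pvPairB l).1 = PySem.List.pyGetD l (-1) 0 := by
    by_cases h2 : 2 ≤ l.length
    · simp [pvPairB, h2]
    · have h1 : l.length = 1 := by omega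
      obtain ⟨a, rfl⟩ := List.length_eq_one_iff.mp h1
      simp [pvPairB, pyGetD_singleton_neg]
  rw [hfst]
  unfold pvPairB
  rw [if_pos hlen, pyGetD_append_neg_one l i h, pyGetD_append_neg_two l i h]

lemma pvGm_get? (o : PySem.Dict String (List Int)) (k : String) :
    (pvGm o).get? k = (o.get? k).map pvPairB := by
  obtain ⟨l⟩ := o
  induction l with
  | nil => rfl
  | cons p rest ih =>
    obtain ⟨a, w⟩ := p
    simp only [pvGm, List.map_cons] at *
    rw [PySem.Dict.get?_mk_cons, PySem.Dict.get?_mk_cons]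
    by_cases hk : a == k
    · simp [hk]
    · simp only [hk, Bool.false_eq_true, ite_false]
      exact ih

lemma pvGm_keys (o : PySem.Dict String (List Int)) : (pvGm o).keys = o.keys := by
  simp [pvGm, PySem.Dict.keys]

lemma pvGm_contains (o : PySem.Dict String (List Int)) (k : String) :
    (pvGm o).contains k = o.contains k := by
  rw [PySem.Dict.contains_eq_decide_mem_keys, PySem.Dict.contains_eq_decide_mem_keys, pvGm_keys]

lemma pvGm_insert (o : PySem.Dict String (List Int)) (k : String) (w : List Int) :
    pvGm (o.insert k w) = (pvGm o).insert k (pvPairB w) := by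
  apply PySem.Dict.ext
  have hitems : ∀ d : PySem.Dict String (List Int),
      (pvGm d).items = d.items.map (fun p => (p.1, pvPairB p.2)) := fun _ => rfl
  rw [hitems, PySem.Dict.items_insert, PySem.Dict.items_insert, pvGm_contains, hitems]
  by_cases hc : o.contains k
  · simp only [hc, if_true, List.map_map]
    apply List.map_congr_left
    intro p _
    by_cases hp : p.1 = k
    · simp [hp]
    · simp [hp]
  · simp [hc]

-- one event (vertex index i, edge e): A's dict update mirrors B's occurrence append
lemma pv_step (o : PySem.Dict String (List Int)) (i : Int) (e : String) (hInv : pvInv o) :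
    (match (pvGm o).get? e with
     | some (j1, _j2) => (pvGm o).insert e (i, j1)
     | none => (pvGm o).insert e (i, i)) = pvGm (o.modify e [] (· ++ [i]))
    ∧ pvInv (o.modify e [] (· ++ [i])) := by
  have hmod : o.modify e [] (· ++ [i]) = o.insert e (o.getD e [] ++ [i]) := by
    simp [PySem.Dict.modify]
  constructor
  · rw [pvGm_get? o e, hmod, pvGm_insert]
    cases h : o.get? e with
    | none =>
      have hd : o.getD e [] = [] := by
        rw [PySem.Dict.getD_eq_get?_getD, h]; rfl
      rw [hd]
      simp [pvPairB_singleton]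
    | some l =>
      have hmem : (e, l) ∈ o.items := by
        exact PySem.Dict.mem_items_of_get?_eq_some o h
      have hne : l ≠ [] := hInv.2 (e, l) hmem
      have hd : o.getD e [] = l := by
        rw [PySem.Dict.getD_eq_get?_getD, h]; rfl
      rw [hd]
      simp only [Option.map_some]
      rw [pvPairB_append l i hne]
  · rw [hmod]
    refine ⟨PySem.Dict.nodup_keys_insert _ _ _ hInv.1, ?_⟩
    intro p hp
    rcases (PySem.Dict.mem_items_insert _ _ _ _).mp hp with hpe | ⟨hpo, _⟩
    · subst hpe; simp
    · exact hInv.2 p hpo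

-- B's inner loop over one vertex's edge list, against A's
lemma pv_inner (i : Int) (es : List String) (o : PySem.Dict String (List Int)) (hInv : pvInv o) :
    es.foldl (fun vertices e =>
        match vertices.get? e with
        | some (j1, _j2) => vertices.insert e (i, j1)
        | none => vertices.insert e (i, i)) (pvGm o)
      = pvGm (es.foldl (fun occ e => occ.modify e [] (· ++ [i])) o)
    ∧ pvInv (es.foldl (fun occ e => occ.modify e [] (· ++ [i])) o) := by
  induction es generalizing o with
  | nil => exact ⟨rfl, hInv⟩
  | cons e rest ih =>
    obtain ⟨hstep, hInv'⟩ := pv_step o i e hInv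
    simp only [List.foldl_cons]
    rw [hstep]
    exact ih _ hInv'

-- the outer loop over the enumerated vertex lists
lemma pv_outer (ps : List (Int × List String)) (o : PySem.Dict String (List Int)) (hInv : pvInv o) :
    ps.foldl (fun (vertices : PySem.Dict String (Int × Int)) p =>
        p.2.foldl (fun vertices e =>
          match vertices.get? e with
          | some (j1, _j2) => vertices.insert e (p.1, j1)
          | none => vertices.insert e (p.1, p.1)) vertices) (pvGm o)
      = pvGm (ps.foldl (fun occ p => p.2.foldl (fun occ e => occ.modify e [] (· ++ [p.1])) occ) o)
    ∧ pvInv (ps.foldl (fun occ p => p.2.foldl (fun occ e => occ.modify e [] (· ++ [p.1])) occ) o) := by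
  induction ps generalizing o with
  | nil => exact ⟨rfl, hInv⟩
  | cons p rest ih =>
    obtain ⟨hstep, hInv'⟩ := pv_inner p.1 p.2 o hInv
    simp only [List.foldl_cons]
    rw [hstep]
    exact ih _ hInv'

-- ===== VERDICT (by name: the statement is the Claim_ definition above) =====
theorem edges_dict_from_edges_list_spec : Claim_equal_edges_dict_from_edges_list := by
  intro edges_list _hdom
  unfold Spec_edges_dict_from_edges_list edges_dict_from_edges_list edges_dict_from_edges_list_alt
  have hemp : (pvGm PySem.Dict.empty) = (PySem.Dict.empty : PySem.Dict String (Int × Int)) := rfl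
  have hInv : pvInv PySem.Dict.empty := ⟨List.nodup_nil, by intro p hp; simp [PySem.Dict.empty] at hp⟩
  obtain ⟨heq, _⟩ := pv_outer (PySem.List.enumerate edges_list 0) PySem.Dict.empty hInv
  rw [← hemp, heq]
  rfl
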